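-- pv_equiv track=rewrite | github.com/UtsavK-0112/PythonProblems | labs109.py | colour_trio
-- ===== SOURCE A (Python) =====
-- def mix(colour_1, colour_2, trio=['r', 'b', 'y']):
--     if colour_1 == colour_2:
--         return colour_1
--     else:
--         return list(filter(lambda x: (x != colour_1 and x != colour_2), trio))[0]
--
-- def colour_trio(colours):
--     c = colours
--
--     while len(c) > 1:
--         result = ""
--         for index, colour in enumerate(list(c)[:-1]):
--             result += mix(colour, c[index + 1])
--         c = result
--
--     return c
-- ===== SOURCE B (Python) =====
-- def _mix(a, b):
--     if a == b:
--         return a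
--     for c in 'rby':
--         if c != a and c != b:
--             return c
--
-- def colour_trio(colours):
--     # One left-to-right pass.  diag[k] is the reduction of the last k+1
--     # characters read so far (the current diagonal of the mixing triangle);
--     # reading one more character extends the diagonal by one entry.
--     diag = []
--     for ch in colours:
--         new = [ch]
--         for prev in diag:
--             new.append(_mix(prev, new[-1]))
--         diag = new
--     return diag[-1] if diag else ''
-- ===== Notes on version B (the rewrite author's own statement) =====
-- stated objective: alternative
-- what changed: Instead of A's while-loop of whole-string mixing passes that rebuilds a new string each round, B makes a single left-to-right pass maintaining the diagonal of the mixing triangle (the reduction of every suffix of the prefix read so far), extending it by one mix chain per character; it is total and exact on all inputs.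
import Mathlib
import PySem

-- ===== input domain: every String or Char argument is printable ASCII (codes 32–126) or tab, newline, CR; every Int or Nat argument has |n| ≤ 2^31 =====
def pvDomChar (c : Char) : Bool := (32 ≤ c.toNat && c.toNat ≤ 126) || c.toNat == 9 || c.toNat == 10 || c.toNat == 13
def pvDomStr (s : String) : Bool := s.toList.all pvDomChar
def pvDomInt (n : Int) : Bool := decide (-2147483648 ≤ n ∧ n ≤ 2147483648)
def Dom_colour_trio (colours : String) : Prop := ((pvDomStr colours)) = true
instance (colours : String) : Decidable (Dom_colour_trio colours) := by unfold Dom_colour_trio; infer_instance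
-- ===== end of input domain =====

-- B replaces A's repeated whole-string mixing passes by a single left-to-right pass
-- that maintains the current diagonal of the mixing triangle (one reduction per
-- suffix length); same result, a different traversal of the same triangle.


-- ===== PORT A =====
-- the filter over the trio is nonempty whenever c1 ≠ c2 (three distinct candidates, two
-- exclusions), so Python's `[0]` never raises and headD is exact
def pvMixA (c1 c2 : Char) : Char :=
  if c1 == c2 then c1
  else (((['r', 'b', 'y'] : List Char).filter (fun x => x != c1 && x != c2)).headD 'r')

-- result = ""; for index, colour in enumerate(list(c)[:-1]): result += mix(colour, c[index + 1])
def pvPassA (c : List Char) : List Char :=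
  (PySem.List.enumerate (PySem.List.slice c none (some (-1))) 0).foldl
    (fun result p => result ++ [pvMixA p.2 (PySem.List.pyGetD c (p.1 + 1) 'r')]) []

-- while len(c) > 1: c = one mixing pass over c.  Each pass shortens c by exactly one
-- character, so the initial length is a provably sufficient iteration bound (fuel).
def pvLoopA (fuel : Nat) (c : List Char) : List Char :=
  match fuel with
  | 0 => c
  | fuel + 1 => if 1 < c.length then pvLoopA fuel (pvPassA c) else c

def colour_trio (colours : String) : String :=
  String.ofList (pvLoopA colours.toList.length colours.toList)

-- ===== PORT B =====
-- for c in 'rby': if c != a and c != b: return c — the loop always finds a colour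
-- (two exclusions among three candidates), so Python never falls through to None
-- and find?'s getD default is unused
def pvMixB (a b : Char) : Char :=
  if a == b then a
  else ((['r', 'b', 'y'] : List Char).find? (fun c => c != a && c != b)).getD 'r'

-- new = [ch]; for prev in diag: new.append(_mix(prev, new[-1]))
def pvGrow (diag : List Char) (ch : Char) : List Char :=
  diag.foldl (fun neu prev => neu ++ [pvMixB prev (PySem.List.pyGetD neu (-1) ' ')]) [ch]

-- diag = []; for ch in colours: diag = grown diag; return diag[-1] if diag else ''
def colour_trio_alt (colours : String) : String :=
  let diag := colours.toList.foldl pvGrow []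
  if diag ≠ [] then String.ofList [PySem.List.pyGetD diag (-1) ' '] else ""

-- ===== PRECONDITION & SPEC =====
def Spec_colour_trio (colours : String) (out : String) : Prop := out = colour_trio_alt colours
instance (colours : String) (out : String) : Decidable (Spec_colour_trio colours out) := by unfold Spec_colour_trio; infer_instance

-- ===== CLAIM (what is proved, stated in full; the proofs are below) =====
def Claim_equal_colour_trio : Prop := ∀ (colours : String), Dom_colour_trio colours → Spec_colour_trio colours (colour_trio colours)

-- ===== LEMMAS AND PROOFS =====

lemma pvMixB_eq_mixA (a b : Char) : pvMixB a b = pvMixA a b := by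
  rw [pvMixB, pvMixA]
  by_cases hab : a == b
  · simp [hab]
  · rw [if_neg hab, if_neg hab]
    by_cases h1 : (('r' : Char) != a && ('r' : Char) != b) <;>
    by_cases h2 : (('b' : Char) != a && ('b' : Char) != b) <;>
    by_cases h3 : (('y' : Char) != a && ('y' : Char) != b) <;>
      simp [List.find?, List.filter, h1, h2, h3]

lemma pvPassA_eq_map (l : List Char) :
    pvPassA l = (List.range (l.length - 1)).map
      (fun i => pvMixA (l.getD i 'r') (l.getD (i + 1) 'r')) := by
  rw [pvPassA, PySem.List.foldl_append_singleton_eq_map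
    (fun p : Int × Char => pvMixA p.2 (PySem.List.pyGetD l (p.1 + 1) 'r'))]
  rw [PySem.List.slice_to_neg_one, PySem.List.enumerate_eq_map_pyRange _ 'r',
    PySem.List.pyRange_one]
  simp only [List.map_map, List.nil_append]
  have hlen : PySem.List.len l.dropLast = ((l.length - 1 : Nat) : Int) := by
    simp [PySem.List.len]
  rw [hlen]
  simp only [Int.sub_zero, Int.toNat_natCast]
  apply List.map_congr_left
  intro i hi
  simp only [List.mem_range] at hi
  simp only [Function.comp]
  have h2 : ((i : Int)) + 1 = (((i + 1 : Nat)) : Int) := by omega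
  simp only [zero_add]
  rw [h2, PySem.List.pyGetD_natCast, PySem.List.pyGetD_natCast]
  congr 1
  rw [List.getD_eq_getElem _ _ (by simp [List.length_dropLast]; omega),
      List.getD_eq_getElem _ _ (by omega)]
  exact List.getElem_dropLast _

lemma pvPassA_length (l : List Char) : (pvPassA l).length = l.length - 1 := by
  simp [pvPassA_eq_map]

lemma pvPassA_getElem (l : List Char) (i : Nat) (h : i < l.length - 1) :
    (pvPassA l)[i]'(by rw [pvPassA_length]; omega)
      = pvMixA (l.getD i 'r') (l.getD (i + 1) 'r') := by
  simp [pvPassA_eq_map]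

-- the canonical "pass until one colour is left" loop A's fuelled loop computes
def pvLoopC (c : List Char) : List Char :=
  if 1 < c.length then pvLoopC (pvPassA c) else c
termination_by c.length
decreasing_by simp [pvPassA_length]; omega

lemma pvLoopC_pass (c : List Char) (h : 1 < c.length) :
    pvLoopC (pvPassA c) = pvLoopC c := by
  conv_rhs => rw [pvLoopC]
  rw [if_pos h]

lemma pvLoopA_eq_loopC (fuel : Nat) (c : List Char) (hf : c.length ≤ fuel + 1) :
    pvLoopA fuel c = pvLoopC c := by
  induction fuel generalizing c with
  | zero => rw [pvLoopA, pvLoopC, if_neg (by omega)]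
  | succ fuel ih =>
    rw [pvLoopA]
    by_cases h : 1 < c.length
    · rw [if_pos h, ih _ (by rw [pvPassA_length]; omega), pvLoopC_pass c h]
    · rw [if_neg h, pvLoopC, if_neg h]

lemma pvLoopC_length (l : List Char) (hl : l ≠ []) : (pvLoopC l).length = 1 := by
  by_cases h : 1 < l.length
  · rw [pvLoopC, if_pos h]
    apply pvLoopC_length
    have := pvPassA_length l
    intro hc
    rw [hc] at this
    simp at this
    omega
  · rw [pvLoopC, if_neg h]
    have : l.length ≠ 0 := fun hc => hl (List.length_eq_zero_iff.mp hc)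
    omega
termination_by l.length
decreasing_by simp [pvPassA_length]; omega

-- the single colour a nonempty string reduces to
def pvFin (l : List Char) : Char := (pvLoopC l).headD ' '

lemma pvLoopC_singleton (l : List Char) (hl : l ≠ []) : pvLoopC l = [pvFin l] := by
  have h := pvLoopC_length l hl
  cases hc : pvLoopC l with
  | nil => rw [hc] at h; simp at h
  | cons c rest =>
    rw [hc] at h
    have hr : rest = [] := by simpa using h
    subst hr
    simp [pvFin, hc]

lemma pvFin_singleton (a : Char) : pvFin [a] = a := by
  rw [pvFin, pvLoopC]
  simp

lemma pvFin_pass (l : List Char) (h : 2 ≤ l.length) : pvFin (pvPassA l) = pvFin l := by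
  rw [pvFin, pvFin, pvLoopC_pass l (by omega)]

lemma pvPassA_dropLast (l : List Char) :
    pvPassA l.dropLast = (pvPassA l).dropLast := by
  apply List.ext_getElem
  · simp [pvPassA_length]
  intro i h1 h2
  rw [List.getElem_dropLast]
  have hi : i < l.length - 2 := by
    simp [pvPassA_length] at h1; omega
  rw [pvPassA_getElem _ _ (by simp; omega), pvPassA_getElem _ _ (by omega)]
  congr 1 <;>
  · rw [List.getD_eq_getElem _ _ (by simp; omega), List.getD_eq_getElem _ _ (by omega)]
    exact List.getElem_dropLast _

lemma pvPassA_tail (l : List Char) :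
    pvPassA l.tail = (pvPassA l).tail := by
  apply List.ext_getElem
  · simp [pvPassA_length]
  intro i h1 h2
  rw [List.getElem_tail]
  have hi : i < l.length - 2 := by
    simp [pvPassA_length] at h1; omega
  rw [pvPassA_getElem _ _ (by simp; omega), pvPassA_getElem _ _ (by omega)]
  congr 1 <;>
  · rw [List.getD_eq_getElem _ _ (by simp; omega), List.getD_eq_getElem _ _ (by omega)]
    simp [List.getElem_tail]

-- the triangle recurrence: the reduction of l is the mix of the reductions of
-- l without its last and l without its first character
lemma pvFin_step (l : List Char) (h : 2 ≤ l.length) :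
    pvFin l = pvMixA (pvFin l.dropLast) (pvFin l.tail) := by
  by_cases h3 : 3 ≤ l.length
  · rw [← pvFin_pass l (by omega)]
    rw [pvFin_step (pvPassA l) (by rw [pvPassA_length]; omega)]
    rw [← pvPassA_dropLast, ← pvPassA_tail]
    rw [pvFin_pass _ (by simp; omega), pvFin_pass _ (by simp; omega)]
  · -- l = [a, b]
    have h2 : l.length = 2 := by omega
    obtain ⟨a, l1⟩ : ∃ a l1, l = a :: l1 := by
      cases l with
      | nil => simp at h2
      | cons a t => exact ⟨a, t, rfl⟩
    obtain ⟨l1, rfl⟩ := l1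
    obtain ⟨b, l2⟩ : ∃ b l2, l1 = b :: l2 := by
      cases l1 with
      | nil => simp at h2
      | cons b t => exact ⟨b, t, rfl⟩
    obtain ⟨l2, rfl⟩ := l2
    have : l2 = [] := by simp at h2; exact h2
    subst this
    have hp : pvPassA [a, b] = [pvMixA a b] := by
      rw [pvPassA_eq_map]
      simp [List.range_succ]
    have hfin : pvFin [a, b] = pvMixA a b := by
      rw [pvFin, pvLoopC, if_pos (by simp), hp, pvLoopC, if_neg (by simp)]
      simp
    rw [hfin]
    simp [pvFin_singleton]
termination_by l.length
decreasing_by rw [pvPassA_length]; omega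

-- the chain of mixes B's inner loop appends, starting from the value `last`
def pvChain (last : Char) (l : List Char) : List Char :=
  match l with
  | [] => []
  | p :: rest => pvMixB p last :: pvChain (pvMixB p last) rest

lemma pvGrow_foldl (l acc : List Char) (hacc : acc ≠ []) :
    l.foldl (fun neu prev => neu ++ [pvMixB prev (PySem.List.pyGetD neu (-1) ' ')]) acc
      = acc ++ pvChain (acc.getLastD ' ') l := by
  induction l generalizing acc with
  | nil => simp [pvChain]
  | cons p rest ih =>
    rw [List.foldl_cons, PySem.List.pyGetD_neg_one _ _ hacc]
    have hL : acc.getLast hacc = acc.getLastD ' ' := by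
      rw [List.getLastD_eq_getLast?, List.getLast?_eq_some_getLast hacc, Option.getD_some]
    rw [ih _ (by simp), hL, pvChain]
    simp [List.getLastD_eq_getLast?]

-- the suffix of the last k characters
def pvSfx (p : List Char) (k : Nat) : List Char := p.drop (p.length - k)

lemma pvSfx_append (p : List Char) (c : Char) (k : Nat) (hk : k ≤ p.length) :
    pvSfx (p ++ [c]) (k + 1) = pvSfx p k ++ [c] := by
  rw [pvSfx, pvSfx]
  simp only [List.length_append, List.length_cons, List.length_nil]
  rw [show p.length + (0 + 1) - (k + 1) = p.length - k by omega]
  rw [List.drop_append_of_le_length (by omega)]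

lemma pvSfx_length (p : List Char) (k : Nat) (hk : k ≤ p.length) :
    (pvSfx p k).length = k := by
  rw [pvSfx, List.length_drop]; omega

lemma pvSfx_tail (p : List Char) (k : Nat) (hk : k < p.length) :
    (pvSfx p (k + 1)).tail = pvSfx p k := by
  rw [pvSfx, pvSfx, List.tail_drop]
  congr 1
  omega

lemma pvSfx_self (p : List Char) : pvSfx p p.length = p := by
  simp [pvSfx]

-- the key step: mixing a stored suffix reduction with the freshly extended one
lemma pvStep_key (p : List Char) (c : Char) (j : Nat) (hj : j < p.length) :
    pvMixA (pvFin (pvSfx p (j + 1))) (pvFin (pvSfx (p ++ [c]) (j + 1)))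
      = pvFin (pvSfx (p ++ [c]) (j + 2)) := by
  have e2 : pvSfx (p ++ [c]) (j + 2) = pvSfx p (j + 1) ++ [c] :=
    pvSfx_append p c (j + 1) (by omega)
  have e1 : pvSfx (p ++ [c]) (j + 1) = (pvSfx p (j + 1) ++ [c]).tail := by
    rw [← e2, pvSfx_tail _ _ (by simp; omega)]
  have hlen : (pvSfx p (j + 1)).length = j + 1 := pvSfx_length _ _ (by omega)
  rw [pvFin_step (pvSfx (p ++ [c]) (j + 2)) (by rw [e2]; simp [hlen])]
  rw [e2, List.dropLast_concat, e1]

lemma pvChain_spec (p : List Char) (c : Char) (m : Nat) : ∀ (j : Nat),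
    j + m = p.length →
    pvChain (pvFin (pvSfx (p ++ [c]) (j + 1)))
        ((List.range' (j + 1) m).map (fun k => pvFin (pvSfx p k)))
      = (List.range' (j + 2) m).map (fun k => pvFin (pvSfx (p ++ [c]) k)) := by
  induction m with
  | zero => intro j hj; simp [pvChain]
  | succ m ih =>
    intro j hj
    rw [List.range'_succ, List.range'_succ, List.map_cons, List.map_cons, pvChain]
    rw [pvMixB_eq_mixA, pvStep_key p c j (by omega)]
    rw [show j + 1 + 1 = (j + 1) + 1 by ring, ih (j + 1) (by omega)]

lemma pvDiag_inv (p : List Char) :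
    p.foldl pvGrow [] = (List.range' 1 p.length).map (fun k => pvFin (pvSfx p k)) := by
  induction p using List.reverseRecOn with
  | nil => simp
  | append_singleton p c ih =>
    rw [List.foldl_append, List.foldl_cons, List.foldl_nil, ih, pvGrow]
    rw [pvGrow_foldl _ [c] (by simp)]
    have h1 : pvSfx (p ++ [c]) 1 = [c] := by
      have := pvSfx_append p c 0 (by omega)
      rwa [show pvSfx p 0 = [] by simp [pvSfx], List.nil_append] at this
    have hc : pvFin (pvSfx (p ++ [c]) (0 + 1)) = c := by
      rw [show (0 + 1 : Nat) = 1 from rfl, h1, pvFin_singleton]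
    have hch := pvChain_spec p c p.length 0 (by omega)
    rw [hc] at hch
    rw [show ([c] : List Char).getLastD ' ' = c from rfl, hch]
    rw [show (p ++ [c]).length = p.length + 1 by simp, List.range'_succ, List.map_cons]
    simp [h1, pvFin_singleton]

-- ===== VERDICT (by name: the statement is the Claim_ definition above) =====
theorem colour_trio_spec : Claim_equal_colour_trio := by
  intro colours _
  unfold Spec_colour_trio colour_trio colour_trio_alt
  rw [pvLoopA_eq_loopC colours.toList.length _ (by omega)]
  cases hnil : colours.toList with
  | nil =>
    simp only [List.foldl_nil]
    rw [pvLoopC]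
    simp
  | cons c0 rest =>
    rw [← hnil]
    have hne : colours.toList ≠ [] := by rw [hnil]; simp
    have hn : 1 ≤ colours.toList.length := by rw [hnil]; simp
    rw [pvLoopC_singleton _ hne]
    show _ = (if colours.toList.foldl pvGrow [] ≠ [] then _ else "")
    rw [pvDiag_inv]
    have hlast : ((List.range' 1 colours.toList.length).map
        (fun k => pvFin (pvSfx colours.toList k))) ≠ [] := by
      simp only [ne_eq, List.map_eq_nil_iff, List.range'_eq_nil_iff]
      omega
    rw [if_pos hlast]
    congr 1
    rw [PySem.List.pyGetD_neg_one _ _ hlast]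
    rw [List.getLast_eq_getElem]
    simp only [List.getElem_map, List.getElem_range', List.length_map, List.length_range']
    rw [show 1 + 1 * (colours.toList.length - 1) = colours.toList.length by omega,
      pvSfx_self]
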